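-- pv_equiv track=rewrite | github.com/davidburhans/otherwords | otherwords/__init__.py | buildCountedDict
-- ===== SOURCE A (Python) =====
-- from collections import OrderedDict
--
-- def buildCountedDict(phrase):
--     ret = OrderedDict()
--     for p in phrase:
--       if p in ret:
--         ret[p] += 1
--       else:
--         ret[p] = 1
--     return ret
-- ===== SOURCE B (Python) =====
-- from collections import OrderedDict
--
-- def buildCountedDict(phrase):
--     items = list(phrase)
--     seen = set()
--     unique = []
--     for p in items:
--         if p not in seen:
--             seen.add(p)
--             unique.append(p)
--     return OrderedDict((k, items.count(k)) for k in unique)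
-- ===== Notes on version B (the rewrite author's own statement) =====
-- stated objective: alternative
-- what changed: Replaces the single-pass dict-update loop by a first-seen dedupe pass followed by a per-key items.count pass that builds the OrderedDict in one constructor call.
import Mathlib
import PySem

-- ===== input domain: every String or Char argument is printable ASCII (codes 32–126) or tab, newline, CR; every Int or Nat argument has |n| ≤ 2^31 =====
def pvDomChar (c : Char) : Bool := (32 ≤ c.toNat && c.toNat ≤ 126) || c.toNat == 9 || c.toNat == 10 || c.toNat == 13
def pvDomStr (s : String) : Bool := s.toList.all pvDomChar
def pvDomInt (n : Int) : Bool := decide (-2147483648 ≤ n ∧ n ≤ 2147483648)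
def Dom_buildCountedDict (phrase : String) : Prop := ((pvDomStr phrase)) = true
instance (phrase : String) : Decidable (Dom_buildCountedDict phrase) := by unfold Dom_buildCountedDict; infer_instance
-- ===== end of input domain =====

-- B replaces A's single-pass dict-update loop by a first-seen dedupe pass plus a per-key count pass (alternative decomposition, same results).

-- ===== PORT A =====
-- for p in phrase: if p in ret: ret[p] += 1 else: ret[p] = 1; return ret (as an items list)
def buildCountedDict (phrase : String) : List (String × Int) :=
  (phrase.toList.foldl
    (fun (ret : PySem.Dict String Int) c =>
      let p := String.singleton c
      if ret.contains p then ret.insert p (ret.getD p 0 + 1)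
      else ret.insert p 1)
    PySem.Dict.empty).items

-- ===== PORT B =====
-- items = list(phrase); first-seen dedupe into `unique` guarded by `seen`; OrderedDict((k, items.count k) for k in unique)
def buildCountedDict_alt (phrase : String) : List (String × Int) :=
  let items := phrase.toList.map String.singleton
  let su := items.foldl
    (fun (st : PySem.Set String × List String) p =>
      if st.1.contains p then st else (st.1.add p, st.2 ++ [p]))
    ([], [])
  (PySem.Dict.ofList (su.2.map (fun k => (k, (items.count k : Int))))).items

-- ===== PRECONDITION & SPEC =====
def Spec_buildCountedDict (phrase : String) (out : List (String × Int)) : Prop := out = buildCountedDict_alt phrase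
instance (phrase : String) (out : List (String × Int)) : Decidable (Spec_buildCountedDict phrase out) := by unfold Spec_buildCountedDict; infer_instance

-- ===== CLAIM (what is proved, stated in full; the proofs are below) =====
def Claim_equal_buildCountedDict : Prop := ∀ (phrase : String), Dom_buildCountedDict phrase → Spec_buildCountedDict phrase (buildCountedDict phrase)

-- ===== LEMMAS AND PROOFS =====

-- the dedupe loop, started on a diagonal state, computes PySem.Set.update in its second component
theorem pv_dedupe_loop (l : List String) (s : PySem.Set String) :
    (l.foldl (fun (st : PySem.Set String × List String) p =>
        if st.1.contains p then st else (st.1.add p, st.2 ++ [p])) (s, s)).2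
      = PySem.Set.update s l := by
  induction l generalizing s with
  | nil => simp [PySem.Set.update]
  | cons p l ih =>
    rw [List.foldl_cons, PySem.Set.update_cons]
    by_cases h : p ∈ s
    · have hc : s.contains p = true := by simp [h]
      simpa [h, hc, PySem.Set.add_of_mem h] using ih s
    · have hc : s.contains p = false := by simp [h]
      have hadd : PySem.Set.add s p = s ++ [p] := PySem.Set.add_of_not_mem h
      simpa [h, hc, hadd] using ih (PySem.Set.add s p)

-- A's loop body is exactly the counter step (in the fresh branch getD is 0)
theorem pv_A_eq_counter (xs : List String) :
    xs.foldl (fun (ret : PySem.Dict String Int) p =>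
        if ret.contains p then ret.insert p (ret.getD p 0 + 1) else ret.insert p 1)
      PySem.Dict.empty
      = PySem.Dict.counter xs := by
  rw [← PySem.Dict.foldl_insert_getD_add_one_eq_counter]
  apply PySem.List.foldl_congr_mem
  intro d p _
  by_cases h : d.contains p = true
  · simp [h]
  · have h0 : d.contains p = false := by simpa using h
    simp [h0, PySem.Dict.getD_of_not_contains d 0 h0]

-- ===== VERDICT (by name: the statement is the Claim_ definition above) =====
theorem buildCountedDict_spec : Claim_equal_buildCountedDict := by
  intro phrase _
  unfold Spec_buildCountedDict buildCountedDict buildCountedDict_alt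
  dsimp only
  set items := phrase.toList.map String.singleton with hitems
  have hA : phrase.toList.foldl
      (fun (ret : PySem.Dict String Int) c =>
        let p := String.singleton c
        if ret.contains p then ret.insert p (ret.getD p 0 + 1) else ret.insert p 1)
      PySem.Dict.empty = PySem.Dict.counter items := by
    rw [hitems, ← pv_A_eq_counter, List.foldl_map]
  rw [hA, PySem.Dict.items_counter]
  have hloop := pv_dedupe_loop items ([] : PySem.Set String)
  rw [PySem.Set.update_nil_left] at hloop
  rw [hloop]
  -- Dict.ofList over nodup fresh keys returns its input pair list as items
  set pairs := (PySem.Set.ofList items).map (fun k => (k, (items.count k : Int))) with hpairs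
  have hnd : (pairs.map Prod.fst).Nodup := by
    have : pairs.map Prod.fst = PySem.Set.ofList items := by
      simp [hpairs, List.map_map, Function.comp_def]
    rw [this]; exact PySem.Set.nodup_ofList items
  rw [PySem.Dict.ofList, PySem.Dict.update]
  rw [PySem.Dict.items_foldl_insert_fresh pairs Prod.fst Prod.snd PySem.Dict.empty
    (by intro a _; simp) hnd]
  simp [PySem.Dict.empty]
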